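-- pv_equiv track=rewrite | github.com/iu3qez/APET | wspr_utils.py | data_by_callsign
-- ===== SOURCE A (Python) =====
-- def data_by_callsign(callsign_sorted_byspots, d_dict):
--     data_bycallsign_dict = {}
--     for call in callsign_sorted_byspots:
--         data_bycallsign_dict[call] = {}
--         for reporter in d_dict:
--             tmp_dict = []
--             for el in d_dict[reporter]:
--                 if call in el:
--                     tmp_dict.append(el[0:1]+el[2:])
--             data_bycallsign_dict[call][reporter] = tmp_dict
--     return data_bycallsign_dict
-- ===== SOURCE B (Python) =====
-- def data_by_callsign(callsign_sorted_byspots, d_dict):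
--     # Build, once per reporter, an index: value -> list of trimmed entries containing it.
--     index = {}
--     for reporter, els in d_dict.items():
--         idx = {}
--         for el in els:
--             trimmed = el[0:1] + el[2:]
--             for v in dict.fromkeys(el):
--                 idx.setdefault(v, []).append(trimmed)
--         index[reporter] = idx
--     return {call: {reporter: idx.get(call, []) for reporter, idx in index.items()}
--             for call in callsign_sorted_byspots}
-- ===== Notes on version B (the rewrite author's own statement) =====
-- stated objective: faster
-- what changed: B builds, once per reporter, a hash index from contained value to the trimmed entries containing it, then answers every callsign/reporter cell by a single dictionary lookup, instead of A's rescan of every reporter's whole entry list for every callsign.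
import Mathlib
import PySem

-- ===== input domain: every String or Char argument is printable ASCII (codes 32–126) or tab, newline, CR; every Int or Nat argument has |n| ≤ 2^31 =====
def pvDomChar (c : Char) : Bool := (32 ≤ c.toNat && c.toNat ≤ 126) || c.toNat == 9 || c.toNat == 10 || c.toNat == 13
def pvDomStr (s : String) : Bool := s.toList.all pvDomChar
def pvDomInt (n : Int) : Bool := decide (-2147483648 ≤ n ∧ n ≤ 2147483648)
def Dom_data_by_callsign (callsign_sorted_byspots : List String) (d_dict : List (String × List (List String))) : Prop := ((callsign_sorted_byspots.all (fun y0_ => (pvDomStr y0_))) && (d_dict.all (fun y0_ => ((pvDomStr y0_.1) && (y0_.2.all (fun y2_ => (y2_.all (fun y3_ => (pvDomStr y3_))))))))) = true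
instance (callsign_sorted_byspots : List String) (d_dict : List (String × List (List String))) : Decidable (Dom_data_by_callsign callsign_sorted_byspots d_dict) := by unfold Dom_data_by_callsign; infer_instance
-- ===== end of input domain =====

-- B replaces A's per-callsign rescans of every reporter entry by a value→entries index
-- built once per reporter, then answered by O(1) dictionary lookups (objective: faster).

-- ===== PORT A =====
-- literal port of A: for call in calls / for reporter in d_dict / for el in d_dict[reporter]
def data_by_callsign (callsign_sorted_byspots : List String) (d_dict : List (String × List (List String))) : List (String × List (String × List (List String))) :=
  ((callsign_sorted_byspots.foldl (fun outer call =>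
      outer.insert call
        ((PySem.Dict.mk d_dict).keys.foldl (fun (inner : PySem.Dict String (List (List String))) reporter =>
            inner.insert reporter
              (((PySem.Dict.mk d_dict).getD reporter []).foldl
                (fun tmp el =>
                  if call ∈ el then
                    tmp ++ [PySem.List.slice el (some 0) (some 1) ++ PySem.List.slice el (some 2) none]
                  else tmp) []))
          PySem.Dict.empty))
    PySem.Dict.empty).items).map (fun p => (p.1, p.2.items))

-- ===== PORT B =====
-- trimmed = el[0:1] + el[2:]
def pvTrim (el : List String) : List String :=
  PySem.List.slice el (some 0) (some 1) ++ PySem.List.slice el (some 2) none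

-- idx: value -> trimmed entries containing it (setdefault(v, []).append(trimmed) = modify)
def pvIndex (els : List (List String)) : PySem.Dict String (List (List String)) :=
  els.foldl (fun idx el =>
      (PySem.List.dedup el).foldl (fun idx v => idx.modify v [] (· ++ [pvTrim el])) idx)
    PySem.Dict.empty

def data_by_callsign_alt (callsign_sorted_byspots : List String) (d_dict : List (String × List (List String))) : List (String × List (String × List (List String))) :=
  let index := d_dict.foldl (fun ix p => ix.insert p.1 (pvIndex p.2)) PySem.Dict.empty
  ((callsign_sorted_byspots.foldl (fun outer call =>
      outer.insert call
        (index.items.foldl (fun (inner : PySem.Dict String (List (List String))) p => inner.insert p.1 (p.2.getD call [])) PySem.Dict.empty))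
    PySem.Dict.empty).items).map (fun p => (p.1, p.2.items))

-- ===== PRECONDITION & SPEC =====
-- Pre_ requires pairwise-distinct reporter keys: d_dict ports a Python dict, which cannot
-- hold duplicate keys, so no Python-reachable input is excluded; on duplicate-key lists the
-- two ports' key-iteration vs pair-iteration readings are both accidental.
def Pre_data_by_callsign (callsign_sorted_byspots : List String) (d_dict : List (String × List (List String))) : Prop :=
  (d_dict.map Prod.fst).Nodup
instance (callsign_sorted_byspots : List String) (d_dict : List (String × List (List String))) : Decidable (Pre_data_by_callsign callsign_sorted_byspots d_dict) := by unfold Pre_data_by_callsign; infer_instance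

def pvWitness_data_by_callsign : List String × (List (String × List (List String))) :=
  (["K1ABC", "W2XYZ"], [("DL1AAA", [["K1ABC", "-12", "20m"], ["W2XYZ", "-3", "40m"]]), ("G4BBB", [])])

def Spec_data_by_callsign (callsign_sorted_byspots : List String) (d_dict : List (String × List (List String))) (out : List (String × List (String × List (List String)))) : Prop := out = data_by_callsign_alt callsign_sorted_byspots d_dict
instance (callsign_sorted_byspots : List String) (d_dict : List (String × List (List String))) (out : List (String × List (String × List (List String)))) : Decidable (Spec_data_by_callsign callsign_sorted_byspots d_dict out) := by unfold Spec_data_by_callsign; infer_instance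

-- ===== CLAIM (what is proved, stated in full; the proofs are below) =====
def Claim_equal_data_by_callsign : Prop := ∀ (callsign_sorted_byspots : List String) (d_dict : List (String × List (List String))), Dom_data_by_callsign callsign_sorted_byspots d_dict → Pre_data_by_callsign callsign_sorted_byspots d_dict → Spec_data_by_callsign callsign_sorted_byspots d_dict (data_by_callsign callsign_sorted_byspots d_dict)

-- ===== LEMMAS AND PROOFS =====

-- filtering a Nodup list for equality with c keeps exactly [c] when present
theorem pv_filter_beq_nodup (c : String) (l : List String) (h : l.Nodup) :
    l.filter (fun v => v == c) = if c ∈ l then [c] else [] := by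
  induction l with
  | nil => simp
  | cons x xs ih =>
    simp only [List.nodup_cons] at h
    by_cases hx : x = c
    · subst hx
      simp [ih h.2, h.1]
    · simp [hx, Ne.symm hx, ih h.2]

-- the per-reporter index answers exactly A's inner filter loop
theorem pv_index_getD (c : String) (els : List (List String)) :
    (pvIndex els).getD c [] = (els.filter (fun el => c ∈ el)).map pvTrim := by
  suffices h : ∀ (idx : PySem.Dict String (List (List String))),
      (els.foldl (fun idx el =>
          (PySem.List.dedup el).foldl (fun idx v => idx.modify v [] (· ++ [pvTrim el])) idx)
        idx).getD c []
      = idx.getD c [] ++ (els.filter (fun el => c ∈ el)).map pvTrim by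
    simpa [pvIndex] using h PySem.Dict.empty
  induction els with
  | nil => simp
  | cons el els ih =>
    intro idx
    have hone : ((PySem.List.dedup el).foldl
        (fun idx v => idx.modify v [] (· ++ [pvTrim el])) idx).getD c []
        = idx.getD c [] ++ (if c ∈ el then [pvTrim el] else []) := by
      have := PySem.Dict.getD_foldl_modify_append
        (l := (PySem.List.dedup el).map (fun v => (v, pvTrim el))) (d := idx) (c := c)
      rw [List.foldl_map] at this
      rw [this]
      rw [List.filter_map]
      simp only [Function.comp_def]
      rw [pv_filter_beq_nodup c _ (PySem.List.nodup_dedup el)]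
      simp only [PySem.List.mem_dedup]
      by_cases hc : c ∈ el
      · simp [hc]
      · simp [hc]
    simp only [List.foldl_cons, List.filter_cons]
    rw [ih, hone]
    by_cases hc : c ∈ el <;> simp [hc]

-- on Nodup keys, B's reporter index lists exactly d_dict's pairs, indexed
theorem pv_index_items (d_dict : List (String × List (List String)))
    (h : (d_dict.map Prod.fst).Nodup) :
    (d_dict.foldl (fun ix p => ix.insert p.1 (pvIndex p.2)) PySem.Dict.empty).items
      = d_dict.map (fun p => (p.1, pvIndex p.2)) := by
  have := PySem.Dict.items_foldl_insert_fresh (l := d_dict) (k := Prod.fst)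
    (v := fun p => pvIndex p.2) (d := PySem.Dict.empty)
    (by intro a _; simp) h
  simpa using this

-- with Nodup keys, A's key-then-lookup retrieves each pair's own value
theorem pv_getD_mk (d_dict : List (String × List (List String)))
    (h : (d_dict.map Prod.fst).Nodup) (p : String × List (List String)) (hp : p ∈ d_dict) :
    (PySem.Dict.mk d_dict).getD p.1 [] = p.2 :=
  PySem.Dict.getD_of_mem_items (d := PySem.Dict.mk d_dict) (k := p.1) (v := p.2) hp h []

theorem pv_inner_eq (call : String) (d_dict : List (String × List (List String)))
    (h : (d_dict.map Prod.fst).Nodup) :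
    ((PySem.Dict.mk d_dict).keys.foldl (fun (inner : PySem.Dict String (List (List String))) reporter =>
        inner.insert reporter
          (((PySem.Dict.mk d_dict).getD reporter []).foldl
            (fun tmp el =>
              if call ∈ el then
                tmp ++ [PySem.List.slice el (some 0) (some 1) ++ PySem.List.slice el (some 2) none]
              else tmp) []))
      PySem.Dict.empty)
    = ((d_dict.foldl (fun ix p => ix.insert p.1 (pvIndex p.2)) PySem.Dict.empty).items.foldl
        (fun (inner : PySem.Dict String (List (List String))) p => inner.insert p.1 (p.2.getD call [])) PySem.Dict.empty) := by
  rw [pv_index_items d_dict h, List.foldl_map]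
  have hkeys : (PySem.Dict.mk d_dict).keys = d_dict.map Prod.fst := by
    simp [PySem.Dict.keys]
  rw [hkeys, List.foldl_map]
  apply PySem.List.foldl_congr_mem
  intro acc p hp
  rw [pv_getD_mk d_dict h p hp, pv_index_getD]
  have := PySem.List.foldl_append_if (fun el => decide (call ∈ el)) pvTrim p.2 []
  simp only [decide_eq_true_eq, List.nil_append] at this
  simp [pvTrim] at this ⊢
  rw [this]

-- ===== VERDICT (by name: the statement is the Claim_ definition above) =====
theorem data_by_callsign_spec : Claim_equal_data_by_callsign := by
  intro calls d_dict _ hpre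
  unfold Spec_data_by_callsign data_by_callsign data_by_callsign_alt
  congr 1
  congr 1
  apply PySem.List.foldl_congr_mem
  intro acc call _
  rw [pv_inner_eq call d_dict hpre]
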